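-- pv_equiv track=rewrite | github.com/mohamedsathik/Authentication | ByteHandler.py | bytesSub
-- ===== SOURCE A (Python) =====
-- def bytesSub(x,y):
--     l = (len(y[0]) + len(y[1]))//2
--     c = 0
--     s = 1
--     for i in range(len(x)):
--         if c == l:
--             c = 0
--             s += 1
--         a = (y[0][c] * s) % 256
--         b = (y[1][c] * s) % 256
--         x[i] =  (x[i] - a - b) % 256
--         c += 1
--     return x
-- ===== SOURCE B (Python) =====
-- def bytesSub(x, y):
--     y0, y1 = y[0], y[1]
--     l = (len(y0) + len(y1)) // 2
--
--     def block(rest, s):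
--         # encrypt one block of up to l elements, then recurse on the tail
--         if not rest:
--             return []
--         enc = [(v - (y0[c] * s) % 256 - (y1[c] * s) % 256) % 256
--                for c, v in enumerate(rest[:l])]
--         return enc + block(rest[l:], s + 1)
--
--     x[:] = block(x, 1)
--     return x
-- ===== Notes on version B (the rewrite author's own statement) =====
-- stated objective: alternative
-- what changed: A is a single flat loop threading a (c, s) counter pair with an explicit reset branch; B recursively splits x into key-length blocks (rest[:l] / rest[l:]), encodes each whole block with enumerate at a fixed round multiplier s, and concatenates the encoded blocks, then writes the result back into x.
import Mathlib
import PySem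

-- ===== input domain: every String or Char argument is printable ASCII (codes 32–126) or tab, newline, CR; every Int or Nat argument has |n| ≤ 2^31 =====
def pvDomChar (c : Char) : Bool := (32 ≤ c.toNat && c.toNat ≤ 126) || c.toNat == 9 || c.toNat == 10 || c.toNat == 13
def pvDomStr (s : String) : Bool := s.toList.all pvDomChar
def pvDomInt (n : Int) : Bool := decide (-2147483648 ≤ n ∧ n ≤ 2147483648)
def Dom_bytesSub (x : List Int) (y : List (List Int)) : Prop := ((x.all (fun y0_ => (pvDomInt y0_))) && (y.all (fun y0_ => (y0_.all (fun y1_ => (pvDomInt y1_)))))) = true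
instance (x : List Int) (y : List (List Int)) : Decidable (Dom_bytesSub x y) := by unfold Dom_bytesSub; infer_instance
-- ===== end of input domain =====

-- B replaces A's flat counter-threaded loop (with its c==l reset branch) by a recursion that
-- slices x into key-length blocks and encodes each block at a fixed round multiplier; same
-- return value; both mutate x in place in Python (same final state).

-- ===== PORT A =====
-- the loop body of A, one iteration: reset branch, the two key bytes, the in-place update
def bytesSubStep (y0 y1 : List Int) (l : Int) (st : Int × Int × List Int) (i : Int) :
    Int × Int × List Int :=
  let cs := if st.1 = l then ((0 : Int), st.2.1 + 1) else (st.1, st.2.1)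
  let a := PySem.Int.mod (PySem.List.pyGetD y0 cs.1 0 * cs.2) 256
  let b := PySem.Int.mod (PySem.List.pyGetD y1 cs.1 0 * cs.2) 256
  (cs.1 + 1, cs.2,
    PySem.List.pySetD st.2.2 i (PySem.Int.mod (PySem.List.pyGetD st.2.2 i 0 - a - b) 256))

def bytesSub (x : List Int) (y : List (List Int)) : List Int :=
  let y0 := PySem.List.pyGetD y 0 []
  let y1 := PySem.List.pyGetD y 1 []
  let l : Int := PySem.Int.floordiv ((y0.length : Int) + (y1.length : Int)) 2
  ((PySem.List.pyRange 0 (x.length : Int) 1).foldl (bytesSubStep y0 y1 l) (0, 1, x)).2.2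

-- ===== PORT B =====
-- the block comprehension: [(v - (y0[c]*s)%256 - (y1[c]*s)%256) % 256 for c, v in enumerate(head)]
def pvBlockEnc (y0 y1 : List Int) (s : Int) (head : List Int) : List Int :=
  (PySem.List.enumerate head 0).map (fun cv =>
    PySem.Int.mod (cv.2 - PySem.Int.mod (PySem.List.pyGetD y0 cv.1 0 * s) 256
                        - PySem.Int.mod (PySem.List.pyGetD y1 cv.1 0 * s) 256) 256)

-- the recursive helper 'block(rest, s)'; rest[:l] / rest[l:] = take/drop since l ≥ 0 (exact);
-- the 'rest ≠ [], l = 0' arm is a totality guard only: Python B recurses forever there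
-- (that case is excluded by Pre_bytesSub, where A raises IndexError as well)
def pvBlockRec (y0 y1 : List Int) (l : Nat) (rest : List Int) (s : Int) : List Int :=
  match rest, l with
  | [], _ => []
  | _ :: _, 0 => []
  | a :: t, l' + 1 =>
      pvBlockEnc y0 y1 s ((a :: t).take (l' + 1)) ++
        pvBlockRec y0 y1 (l' + 1) ((a :: t).drop (l' + 1)) (s + 1)
termination_by rest.length
decreasing_by simp

def bytesSub_alt (x : List Int) (y : List (List Int)) : List Int :=
  let y0 := PySem.List.pyGetD y 0 []
  let y1 := PySem.List.pyGetD y 1 []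
  -- Python's '//' on the nonnegative lengths is exactly Nat division
  let l : Nat := (y0.length + y1.length) / 2
  pvBlockRec y0 y1 l x 1

-- ===== PRECONDITION & SPEC =====
-- Pre_ = exactly the inputs on which Python A returns: y has the two key rows, and either
-- x is empty or the derived block length l = (len y0 + len y1) // 2 is positive and every
-- key index A actually uses (c < min l (len x)) is in range for both rows; outside this A
-- raises IndexError.
def Pre_bytesSub (x : List Int) (y : List (List Int)) : Prop :=
  2 ≤ y.length ∧
  (x = [] ∨
    (1 ≤ ((y.getD 0 []).length + (y.getD 1 []).length) / 2 ∧
     min (((y.getD 0 []).length + (y.getD 1 []).length) / 2) x.length ≤ (y.getD 0 []).length ∧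
     min (((y.getD 0 []).length + (y.getD 1 []).length) / 2) x.length ≤ (y.getD 1 []).length))
instance (x : List Int) (y : List (List Int)) : Decidable (Pre_bytesSub x y) := by
  unfold Pre_bytesSub; infer_instance

def pvWitness_bytesSub : List Int × List (List Int) := ([7, 300, -5], [[1, 2], [3, 250]])

def Spec_bytesSub (x : List Int) (y : List (List Int)) (out : List Int) : Prop := out = bytesSub_alt x y
instance (x : List Int) (y : List (List Int)) (out : List Int) : Decidable (Spec_bytesSub x y out) := by unfold Spec_bytesSub; infer_instance

-- ===== CLAIM (what is proved, stated in full; the proofs are below) =====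
def Claim_equal_bytesSub : Prop := ∀ (x : List Int) (y : List (List Int)), Dom_bytesSub x y → Pre_bytesSub x y → Spec_bytesSub x y (bytesSub x y)

-- ===== LEMMAS AND PROOFS =====

-- simp-free equation lemmas for pvBlockRec's two arms
lemma pvBlockRec_nil (y0 y1 : List Int) (l : Nat) (s : Int) : pvBlockRec y0 y1 l [] s = [] := by
  rw [pvBlockRec.eq_def]

lemma pvBlockRec_cons (y0 y1 : List Int) (a : Int) (t : List Int) (l' : Nat) (s : Int) :
    pvBlockRec y0 y1 (l' + 1) (a :: t) s
      = pvBlockEnc y0 y1 s ((a :: t).take (l' + 1)) ++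
        pvBlockRec y0 y1 (l' + 1) ((a :: t).drop (l' + 1)) (s + 1) := by
  rw [pvBlockRec.eq_def]

-- the per-index value A stores at position i (L = block length, as a Nat)
def pvF (y0 y1 : List Int) (L : Nat) (i : Nat) (v : Int) : Int :=
  PySem.Int.mod (v
    - PySem.Int.mod (y0.getD (i % L) 0 * (((i / L : Nat) : Int) + 1)) 256
    - PySem.Int.mod (y1.getD (i % L) 0 * (((i / L : Nat) : Int) + 1)) 256) 256

-- the same value as B's recursion produces it, round-offset form
def pvG (y0 y1 : List Int) (L : Nat) (s0 : Int) (j : Nat) (v : Int) : Int :=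
  PySem.Int.mod (v
    - PySem.Int.mod (y0.getD (j % L) 0 * (s0 + ((j / L : Nat) : Int))) 256
    - PySem.Int.mod (y1.getD (j % L) 0 * (s0 + ((j / L : Nat) : Int))) 256) 256

-- the array after n iterations of A's loop
def pvPartial (y0 y1 : List Int) (L : Nat) (x : List Int) (n : Nat) : List Int :=
  ((List.range n).map fun i => pvF y0 y1 L i (x.getD i 0)) ++ x.drop n

-- successor step of (· % L, · / L)
lemma pv_succ_mod_div (L m : Nat) (hL : 1 ≤ L) :
    ((m + 1) % L = if m % L + 1 = L then 0 else m % L + 1) ∧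
    ((m + 1) / L = if m % L + 1 = L then m / L + 1 else m / L) := by
  by_cases h : m % L + 1 = L
  · have hm : m + 1 = L * (m / L + 1) := by
      have h1 := Nat.div_add_mod m L
      rw [Nat.mul_succ]; omega
    rw [if_pos h, if_pos h]
    exact ⟨by rw [hm, Nat.mul_mod_right],
      by rw [hm, Nat.mul_div_cancel_left _ (by omega : 0 < L)]⟩
  · have hlt : m % L + 1 < L := by
      have := Nat.mod_lt m (show 0 < L by omega); omega
    have hm : m + 1 = (m % L + 1) + L * (m / L) := by
      have h1 := Nat.div_add_mod m L; omega
    rw [if_neg h, if_neg h]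
    exact ⟨by rw [hm, Nat.add_mul_mod_self_left, Nat.mod_eq_of_lt hlt],
      by rw [hm, Nat.add_mul_div_left _ _ (by omega : 0 < L),
        Nat.div_eq_of_lt hlt, Nat.zero_add]⟩

-- the state A carries after n iterations
def pvC (L n : Nat) : Int := if n = 0 then 0 else ((n - 1) % L : Nat) + 1
def pvS (L n : Nat) : Int := if n = 0 then 1 else ((n - 1) / L : Nat) + 1

-- A's reset branch turns the carried state into the effective (i % L, i / L + 1)
lemma pv_eff_state (L n : Nat) (hL : 1 ≤ L) :
    (if pvC L n = (L : Int) then ((0 : Int), pvS L n + 1) else (pvC L n, pvS L n))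
      = (((n % L : Nat) : Int), ((n / L : Nat) : Int) + 1) := by
  cases n with
  | zero =>
    have h0 : pvC L 0 ≠ (L : Int) := by unfold pvC; simp; omega
    rw [if_neg h0]; unfold pvC pvS; simp
  | succ m =>
    obtain ⟨hmod, hdiv⟩ := pv_succ_mod_div L m hL
    have hceq : pvC L (m + 1) = ((m % L : Nat) : Int) + 1 := by unfold pvC; simp
    have hseq : pvS L (m + 1) = ((m / L : Nat) : Int) + 1 := by unfold pvS; simp
    by_cases h : m % L + 1 = L
    · have hc : pvC L (m + 1) = (L : Int) := by rw [hceq]; omega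
      rw [if_pos hc, hseq, hmod, hdiv, if_pos h, if_pos h]
      refine Prod.ext ?_ ?_
      · show (0 : Int) = ((0 : Nat) : Int)
        simp
      · show ((m / L : Nat) : Int) + 1 + 1 = ((m / L + 1 : Nat) : Int) + 1
        push_cast; ring
    · have hc : pvC L (m + 1) ≠ (L : Int) := by rw [hceq]; omega
      rw [if_neg hc, hceq, hseq, hmod, hdiv, if_neg h, if_neg h]
      refine Prod.ext ?_ ?_
      · show ((m % L : Nat) : Int) + 1 = ((m % L + 1 : Nat) : Int)
        push_cast
        ring
      · show ((m / L : Nat) : Int) + 1 = ((m / L : Nat) : Int) + 1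
        rfl

-- the loop invariant of A's fold
lemma pv_fold (y0 y1 : List Int) (L : Nat) (hL : 1 ≤ L) (x : List Int) (n : Nat)
    (hn : n ≤ x.length) :
    (PySem.List.pyRange 0 (n : Int) 1).foldl (bytesSubStep y0 y1 (L : Int)) (0, 1, x)
      = (pvC L n, pvS L n, pvPartial y0 y1 L x n) := by
  induction n with
  | zero => simp [pvC, pvS, pvPartial]
  | succ m ih =>
    have hm : m ≤ x.length := by omega
    have hmlt : m < x.length := by omega
    rw [show ((m + 1 : Nat) : Int) = (m : Int) + 1 by push_cast; ring,
      PySem.List.pyRange_one_succ_right (by positivity), List.foldl_append, ih hm]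
    simp only [List.foldl_cons, List.foldl_nil]
    show bytesSubStep y0 y1 (L : Int) (pvC L m, pvS L m, pvPartial y0 y1 L x m) (m : Int)
      = (pvC L (m + 1), pvS L (m + 1), pvPartial y0 y1 L x (m + 1))
    unfold bytesSubStep
    simp only
    rw [show (if (pvC L m, pvS L m, pvPartial y0 y1 L x m).1 = (L : Int)
          then ((0 : Int), (pvC L m, pvS L m, pvPartial y0 y1 L x m).2.1 + 1)
          else ((pvC L m, pvS L m, pvPartial y0 y1 L x m).1,
                (pvC L m, pvS L m, pvPartial y0 y1 L x m).2.1))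
        = (((m % L : Nat) : Int), ((m / L : Nat) : Int) + 1) from pv_eff_state L m hL]
    have hlen : ((List.range m).map fun i => pvF y0 y1 L i (x.getD i 0)).length = m := by
      simp
    have hget : PySem.List.pyGetD (pvPartial y0 y1 L x m) (m : Int) 0 = x.getD m 0 := by
      rw [PySem.List.pyGetD_natCast]
      unfold pvPartial
      rw [List.getD, List.getElem?_append_right (by omega), hlen]
      simp [List.getElem?_drop, List.getD]
    have hset : ∀ v : Int, PySem.List.pySetD (pvPartial y0 y1 L x m) (m : Int) v
        = ((List.range m).map fun i => pvF y0 y1 L i (x.getD i 0)) ++ v :: x.drop (m + 1) := by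
      intro v
      rw [PySem.List.pySetD_natCast]
      unfold pvPartial
      rw [List.set_append, hlen, if_neg (lt_irrefl m), Nat.sub_self,
        List.drop_eq_getElem_cons hmlt, List.set_cons_zero]
    refine Prod.ext ?_ (Prod.ext ?_ ?_)
    · show ((m % L : Nat) : Int) + 1 = pvC L (m + 1)
      unfold pvC; simp
    · show ((m / L : Nat) : Int) + 1 = pvS L (m + 1)
      unfold pvS; simp
    · show PySem.List.pySetD (pvPartial y0 y1 L x m) (m : Int)
          (PySem.Int.mod (PySem.List.pyGetD (pvPartial y0 y1 L x m) (m : Int) 0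
            - PySem.Int.mod (PySem.List.pyGetD y0 ((m % L : Nat) : Int) 0 * (((m / L : Nat) : Int) + 1)) 256
            - PySem.Int.mod (PySem.List.pyGetD y1 ((m % L : Nat) : Int) 0 * (((m / L : Nat) : Int) + 1)) 256) 256)
        = pvPartial y0 y1 L x (m + 1)
      rw [hget, hset]
      unfold pvPartial
      rw [List.range_succ, List.map_append, List.append_assoc]
      congr 1
      simp only [List.map_cons, List.map_nil, List.cons_append, List.nil_append]
      congr 1
      unfold pvF
      rw [PySem.List.pyGetD_natCast, PySem.List.pyGetD_natCast]

-- one block's comprehension, index-wise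
lemma pv_enc_eq (y0 y1 : List Int) (s : Int) (head : List Int) :
    pvBlockEnc y0 y1 s head
      = (List.range head.length).map (fun c =>
          PySem.Int.mod (head.getD c 0
            - PySem.Int.mod (y0.getD c 0 * s) 256
            - PySem.Int.mod (y1.getD c 0 * s) 256) 256) := by
  apply List.ext_getElem
  · simp [pvBlockEnc, PySem.List.length_enumerate]
  · intro k h1 h2
    have hk : k < head.length := by
      simpa [pvBlockEnc, PySem.List.length_enumerate] using h1
    simp only [pvBlockEnc, List.getElem_map, PySem.List.getElem_enumerate, List.getElem_range]
    rw [show (0 : Int) + (k : Int) = ((k : Nat) : Int) by omega]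
    rw [PySem.List.pyGetD_natCast, PySem.List.pyGetD_natCast, List.getD_eq_getElem head 0 hk]

-- B's block recursion, characterised position-wise
lemma pv_block (y0 y1 : List Int) (L : Nat) (hL : 1 ≤ L) :
    ∀ (n : Nat) (rest : List Int), rest.length ≤ n → ∀ (s0 : Int),
    pvBlockRec y0 y1 L rest s0
      = (List.range rest.length).map (fun j => pvG y0 y1 L s0 j (rest.getD j 0)) := by
  intro n
  induction n with
  | zero =>
    intro rest hlen s0
    have : rest = [] := by
      cases rest with
      | nil => rfl
      | cons a t => simp at hlen
    subst this
    simp [pvBlockRec_nil]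
  | succ n ih =>
    intro rest hlen s0
    cases rest with
    | nil => simp [pvBlockRec_nil]
    | cons a t =>
      obtain ⟨L', rfl⟩ : ∃ L', L = L' + 1 := ⟨L - 1, by omega⟩
      rw [pvBlockRec_cons]
      have hdrop : ((a :: t).drop (L' + 1)).length ≤ n := by
        simp only [List.length_drop, List.length_cons]
        simp only [List.length_cons] at hlen
        omega
      rw [ih _ hdrop (s0 + 1), pv_enc_eq]
      set r := a :: t with hr
      have hlr : r.length = min (L' + 1) r.length + (r.length - (L' + 1)) := by
        omega
      rw [show (List.range r.length) = List.range (min (L' + 1) r.length)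
            ++ (List.range (r.length - (L' + 1))).map (fun k => min (L' + 1) r.length + k) by
          rw [← List.range_add, ← hlr]]
      rw [List.map_append, List.map_map]
      congr 1
      · -- first block: positions j < min (L'+1) r.length
        rw [List.length_take]
        apply List.ext_getElem
        · simp
        · intro k h1 h2
          have hk : k < min (L' + 1) r.length := by simpa using h1
          have hkL : k < L' + 1 := by omega
          have hkr : k < r.length := by omega
          simp only [List.getElem_map, List.getElem_range]
          have htake : (r.take (L' + 1)).getD k 0 = r.getD k 0 := by
            rw [List.getD_eq_getElem _ 0 (by simpa using hk), List.getElem_take,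
              List.getD_eq_getElem _ 0 hkr]
          rw [htake]
          unfold pvG
          rw [Nat.mod_eq_of_lt hkL, Nat.div_eq_of_lt hkL]
          norm_num
      · -- remaining blocks: position min (L'+1) r.length + k = L' + 1 + k
        apply List.ext_getElem
        · simp
        · intro k h1 h2
          have hk : k < r.length - (L' + 1) := by simpa using h1
          have hmin' : min (L' + 1) r.length = L' + 1 := by
            omega
          simp only [List.getElem_map, List.getElem_range, Function.comp_apply, hmin']
          have hgd : (r.drop (L' + 1)).getD k 0 = r.getD (L' + 1 + k) 0 := by
            rw [List.getD, List.getD, List.getElem?_drop]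
          rw [hgd]
          unfold pvG
          have hdiv : (L' + 1 + k) / (L' + 1) = k / (L' + 1) + 1 := by
            rw [Nat.add_comm (L' + 1) k, Nat.add_div_right _ (by omega)]
          rw [Nat.add_mod_left, hdiv]
          push_cast
          ring_nf

-- with s0 = 1, pvG is pvF
lemma pv_G_one (y0 y1 : List Int) (L : Nat) (j : Nat) (v : Int) :
    pvG y0 y1 L 1 j v = pvF y0 y1 L j v := by
  unfold pvG pvF
  ring_nf

-- ===== VERDICT (by name: the statement is the Claim_ definition above) =====
theorem bytesSub_spec : Claim_equal_bytesSub := by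
  intro x y _hdom hpre
  unfold Spec_bytesSub
  obtain ⟨hy, hrest⟩ := hpre
  set y0 := PySem.List.pyGetD y 0 [] with hy0
  set y1 := PySem.List.pyGetD y 1 [] with hy1
  have hy0' : y0 = y.getD 0 [] := by rw [hy0, PySem.List.pyGetD_zero]
  have hy1' : y1 = y.getD 1 [] := by rw [hy1, PySem.List.pyGetD_ofNat']
  set L : Nat := (y0.length + y1.length) / 2 with hLdefn
  have hLdef : PySem.Int.floordiv ((y0.length : Int) + (y1.length : Int)) 2 = (L : Int) := by
    rw [PySem.Int.floordiv_eq_ediv_of_pos (by norm_num)]; omega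
  rcases hrest with hnil | ⟨hL, _, _⟩
  · subst hnil
    unfold bytesSub bytesSub_alt
    simp [pvBlockRec_nil]
  · have hL1 : 1 ≤ L := by rw [hLdefn, hy0', hy1']; exact hL
    unfold bytesSub
    simp only [← hy0, ← hy1, hLdef]
    rw [pv_fold y0 y1 L hL1 x x.length le_rfl]
    unfold bytesSub_alt
    simp only [← hy0, ← hy1, ← hLdefn]
    rw [pv_block y0 y1 L hL1 x.length x le_rfl 1]
    unfold pvPartial
    simp only [List.drop_length, List.append_nil]
    exact List.map_congr_left fun j _ => (pv_G_one y0 y1 L j (x.getD j 0)).symm
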